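-- pv_equiv track=rewrite | github.com/azizlabib2015/CursoPython | CursoPython/CursoPython/EjerciciosRepaso/funciones.py | secuenciaNumeros
-- ===== SOURCE A (Python) =====
-- def secuenciaNumeros(lista):
--     cont=1
--     repetido=False
--     r=0
--     for x in lista:
--         if cont==1 :
--             r=x
--             cont=cont+1
--         elif cont>1:
--             if x==r:
--                 repetido=True
--             else:r=x
--
--     return repetido
-- ===== SOURCE B (Python) =====
-- def secuenciaNumeros(lista):
--     # Stage 1: run-length encode the list into maximal runs of equal values.
--     runs = []  # list of [value, count]
--     for x in lista:
--         if runs and runs[-1][0] == x: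
--             runs[-1][1] += 1
--         else:
--             runs.append([x, 1])
--     # Stage 2: an adjacent repetition exists iff some run is longer than 1.
--     return any(c > 1 for _, c in runs)
-- ===== Notes on version B (the rewrite author's own statement) =====
-- stated objective: alternative
-- what changed: Replaced A's previous-value/counter flag loop with a groupby-style two-stage algorithm: first build a run-length encoding (list of maximal runs of consecutive equal values), then return whether any run has count > 1.
import Mathlib
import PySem

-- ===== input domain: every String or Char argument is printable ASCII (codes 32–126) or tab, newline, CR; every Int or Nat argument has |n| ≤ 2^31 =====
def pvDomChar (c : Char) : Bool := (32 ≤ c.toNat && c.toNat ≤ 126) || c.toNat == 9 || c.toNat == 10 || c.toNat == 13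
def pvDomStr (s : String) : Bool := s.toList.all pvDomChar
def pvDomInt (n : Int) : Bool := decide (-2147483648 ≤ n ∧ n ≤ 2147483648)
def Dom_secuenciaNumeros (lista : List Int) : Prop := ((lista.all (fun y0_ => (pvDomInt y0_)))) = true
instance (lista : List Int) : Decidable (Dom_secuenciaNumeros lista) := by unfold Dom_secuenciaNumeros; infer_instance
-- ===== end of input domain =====

-- B replaces A's previous-value/flag loop by a groupby-style two-stage pass:
-- build a run-length encoding, then check whether any run has count > 1
-- (no speed claim; return-value equivalence only, though B also mutates nothing).


-- ===== PORT A =====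
-- state = (cont, repetido, r): exactly A's three mutable variables
def secuenciaNumerosStep (st : Int × Bool × Int) (x : Int) : Int × Bool × Int :=
  let (cont, repetido, r) := st
  if cont == 1 then (cont + 1, repetido, x)
  else if cont > 1 then
    (if x == r then (cont, true, r) else (cont, repetido, x))
  else (cont, repetido, r)

def secuenciaNumeros (lista : List Int) : Bool :=
  (lista.foldl secuenciaNumerosStep (1, false, 0)).2.1

-- ===== PORT B =====
-- Stage 1 of Source B: run-length encode.  The accumulator holds Python's `runs`
-- list most-recent-run FIRST (head = runs[-1]); `runs.append` is a cons and
-- `runs[-1][1] += 1` modifies the head.  The final any() ignores the order.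
def pvRunStep (runs : List (Int × Nat)) (x : Int) : List (Int × Nat) :=
  match runs with
  | (v, c) :: rest => if v == x then (v, c + 1) :: rest else (x, 1) :: (v, c) :: rest
  | [] => [(x, 1)]

-- Stage 2 of Source B: any(c > 1 for _, c in runs)
def secuenciaNumeros_alt (lista : List Int) : Bool :=
  (lista.foldl pvRunStep []).any (fun p => p.2 > 1)

-- ===== PRECONDITION & SPEC =====
def Spec_secuenciaNumeros (lista : List Int) (out : Bool) : Prop := out = secuenciaNumeros_alt lista
instance (lista : List Int) (out : Bool) : Decidable (Spec_secuenciaNumeros lista out) := by unfold Spec_secuenciaNumeros; infer_instance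

-- ===== CLAIM (what is proved, stated in full; the proofs are below) =====
def Claim_equal_secuenciaNumeros : Prop := ∀ (lista : List Int), Dom_secuenciaNumeros lista → Spec_secuenciaNumeros lista (secuenciaNumeros lista)

-- ===== LEMMAS AND PROOFS =====

-- "some element of l equals its predecessor", starting with previous value r
def pvAdj (r : Int) : List Int → Bool
  | [] => false
  | x :: xs => (x == r) || pvAdj x xs

-- After the first element A's loop runs with cont = 2 and its repetido flag
-- accumulates exactly pvAdj over the rest of the list.
theorem foldl_two_eq_pvAdj (l : List Int) (rep : Bool) (r : Int) :
    ((l.foldl secuenciaNumerosStep (2, rep, r)).2.1) = (rep || pvAdj r l) := by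
  induction l generalizing rep r with
  | nil => simp [pvAdj]
  | cons x xs ih =>
    rw [List.foldl_cons]
    by_cases h : x = r
    · subst h
      rw [show secuenciaNumerosStep (2, rep, x) x = (2, true, x) from by
        simp [secuenciaNumerosStep], ih]
      simp [pvAdj]
    · rw [show secuenciaNumerosStep (2, rep, r) x = (2, rep, x) from by
        simp [secuenciaNumerosStep, h], ih]
      simp [pvAdj, beq_eq_false_iff_ne.mpr h]

-- B's run fold, started on a nonempty run stack whose top run (v, c) has c ≥ 1,
-- reports a run longer than 1 iff one is already there or pvAdj v l holds.
theorem runs_any_eq_pvAdj (l : List Int) (v : Int) (c : Nat) (rest : List (Int × Nat))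
    (hc : 1 ≤ c) :
    ((l.foldl pvRunStep ((v, c) :: rest)).any (fun p => p.2 > 1))
      = (decide (c > 1) || rest.any (fun p => p.2 > 1) || pvAdj v l) := by
  induction l generalizing v c rest with
  | nil => simp [pvAdj]
  | cons x xs ih =>
    rw [List.foldl_cons]
    by_cases h : v = x
    · subst h
      rw [show pvRunStep ((v, c) :: rest) v = (v, c + 1) :: rest from by
        simp [pvRunStep]]
      rw [ih v (c + 1) rest (by omega)]
      simp [pvAdj, show c + 1 > 1 from by omega]
    · rw [show pvRunStep ((v, c) :: rest) x = (x, 1) :: (v, c) :: rest from by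
        simp [pvRunStep, h]]
      rw [ih x 1 ((v, c) :: rest) (by omega)]
      simp only [pvAdj, beq_eq_false_iff_ne.mpr (fun h' => h h'.symm), Bool.false_or,
        List.any_cons, decide_eq_false (by omega : ¬ (1 > 1)), Bool.false_or]

-- ===== VERDICT (by name: the statement is the Claim_ definition above) =====
theorem secuenciaNumeros_spec : Claim_equal_secuenciaNumeros := by
  intro lista _
  unfold Spec_secuenciaNumeros secuenciaNumeros secuenciaNumeros_alt
  cases lista with
  | nil => simp
  | cons a l =>
    rw [show (List.foldl pvRunStep [] (a :: l)) = List.foldl pvRunStep [(a, 1)] l from rfl,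
      runs_any_eq_pvAdj l a 1 [] (by omega)]
    simp only [List.foldl_cons, secuenciaNumerosStep]
    norm_num
    exact foldl_two_eq_pvAdj l false a
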